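-- pv_equiv track=rewrite | github.com/Hunterdii/GeeksforGeeks-POTD | June 2025 GFG SOLUTION/June-24.py | maxSubseq
-- ===== SOURCE A (Python) =====
-- def maxSubseq(s, k):
--     n, toRemove, res = len(s), k, []
--     for c in s:
--         while res and toRemove and res[-1] < c:
--             res.pop()
--             toRemove -= 1
--         res.append(c)
--     return ''.join(res[:n - k])
-- ===== SOURCE B (Python) =====
-- def maxSubseq(s, k):
--     t = list(s)
--     for _ in range(k):
--         if not t:
--             break
--         i = 0
--         while i + 1 < len(t) and t[i] >= t[i + 1]:
--             i += 1
--         t = t[:i] + t[i + 1:]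
--     return ''.join(t)
-- ===== Notes on version B (the rewrite author's own statement) =====
-- stated objective: alternative
-- what changed: B performs k successive single-character deletions, each scanning for the first position whose character is smaller than its successor (deleting the last character if none, stopping when the string is exhausted), instead of A's one-pass stack with a pop budget and a final truncating slice.
-- intended difference: For k > len(s), A slices the leftover non-increasing stack with a negative index and returns a nonempty string whenever k - len(s) is smaller than the number of suffix-maximum positions of s, even though more than len(s) removals were requested; B returns the empty string, the intended value when every character must be removed. — e.g. on maxSubseq("ba", 3): A returns "b", B returns ""
-- outside the precondition, e.g. on maxSubseq('ab', -1): A returns 'b', B returns 'ab'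
import Mathlib
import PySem

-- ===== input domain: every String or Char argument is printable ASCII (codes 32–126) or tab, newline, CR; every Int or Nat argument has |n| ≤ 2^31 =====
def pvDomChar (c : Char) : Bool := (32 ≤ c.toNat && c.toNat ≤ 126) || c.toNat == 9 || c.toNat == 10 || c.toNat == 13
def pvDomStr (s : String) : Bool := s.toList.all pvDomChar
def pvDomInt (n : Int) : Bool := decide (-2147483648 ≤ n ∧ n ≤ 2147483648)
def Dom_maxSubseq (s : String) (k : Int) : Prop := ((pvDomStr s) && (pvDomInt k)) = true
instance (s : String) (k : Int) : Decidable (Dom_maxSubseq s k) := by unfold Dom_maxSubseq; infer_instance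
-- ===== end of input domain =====

-- B rebuilds the string by k single-character deletions (each deleting the first "ascent"
-- character, stopping when nothing is left) instead of A's one-pass stack with a pop budget
-- and a truncating slice; objective: alternative.

-- ===== PORT A =====
-- the inner `while res and toRemove and res[-1] < c: res.pop(); toRemove -= 1`
def popLoopA (res : List Char) (t : Int) (c : Char) : List Char × Int :=
  match h : res.getLast? with
  | some _x => if t ≠ 0 ∧ _x < c then popLoopA res.dropLast (t - 1) c else (res, t)
  | none => (res, t)
termination_by res.length
decreasing_by
  cases res with
  | nil => simp at h
  | cons y ys => simp [List.length_dropLast]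

-- the `for c in s` loop over the state (res, toRemove)
def maxSubseqLoop : List Char → List Char → Int → List Char × Int
  | [], res, t => (res, t)
  | c :: cs, res, t =>
      let r := popLoopA res t c
      maxSubseqLoop cs (r.1 ++ [c]) r.2

def maxSubseq (s : String) (k : Int) : String :=
  String.ofList (PySem.List.slice (maxSubseqLoop s.toList [] k).1 none (some ((s.length : Int) - k)))

-- ===== PORT B =====
-- the `while i + 1 < len(t) and t[i] >= t[i+1]: i += 1` scan
def ascentIdx (t : List Char) (i : Nat) : Nat :=
  if h : i + 1 < t.length then
    if t[i]'(Nat.lt_of_succ_lt h) ≥ t[i + 1]'h then ascentIdx t (i + 1) else i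
  else i
termination_by t.length - i
decreasing_by omega

-- the `for _ in range(k)` loop with its `if not t: break`
def delLoop : Nat → List Char → List Char
  | 0, t => t
  | m + 1, t =>
      if t = [] then t
      else delLoop m (t.take (ascentIdx t 0) ++ t.drop (ascentIdx t 0 + 1))

def maxSubseq_alt (s : String) (k : Int) : String :=
  String.ofList (delLoop k.toNat s.toList)

-- ===== PRECONDITION & SPEC =====
-- Pre_ excludes k < 0 (outside the natural domain of a removal count), where A's truthiness test
-- on the negative budget makes it pop unboundedly — an accident of the implementation — while B
-- naturally removes nothing.
def Pre_maxSubseq (s : String) (k : Int) : Prop := 0 ≤ k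
instance (s : String) (k : Int) : Decidable (Pre_maxSubseq s k) := by unfold Pre_maxSubseq; infer_instance
def pvWitness_maxSubseq : String × Int := ("geeksforgeeks", 5)

-- `smP l i` decides "position i carries a suffix maximum of l: l[i] is ≥ every later character"
def smP (l : List Char) (i : Nat) : Bool := decide (∀ j, j < l.length → i < j → l[j]! ≤ l[i]!)
-- number of suffix-maximum positions of l
def hullCnt (l : List Char) : Nat := (List.range l.length).countP (smP l)

-- For k > len(s), A slices the leftover non-increasing stack with a negative index and returns a
-- nonempty string whenever k - len(s) is smaller than the number of suffix-maximum positions of s,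
-- even though more than len(s) removals were requested; B returns the empty string, the intended
-- value when every character must be removed.
def D_maxSubseq (s : String) (k : Int) : Prop :=
  s.length < k.toNat ∧ k.toNat < s.length + hullCnt s.toList
instance (s : String) (k : Int) : Decidable (D_maxSubseq s k) := by unfold D_maxSubseq; infer_instance

def Spec_maxSubseq (s : String) (k : Int) (out : String) : Prop := ¬ D_maxSubseq s k → out = maxSubseq_alt s k
instance (s : String) (k : Int) (out : String) : Decidable (Spec_maxSubseq s k out) := by unfold Spec_maxSubseq; infer_instance

def pvDiffWitness_maxSubseq : String × Int := ("ba", 3)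
def pvDiffWitnessOut_maxSubseq : String × String := ("b", "")

-- ===== CLAIM (what is proved, stated in full; the proofs are below) =====
def Claim_unchanged_maxSubseq : Prop := ∀ (s : String) (k : Int), Dom_maxSubseq s k → Pre_maxSubseq s k → Spec_maxSubseq s k (maxSubseq s k)
def Claim_changed_maxSubseq : Prop := Dom_maxSubseq (pvDiffWitness_maxSubseq.1) (pvDiffWitness_maxSubseq.2) ∧ Pre_maxSubseq (pvDiffWitness_maxSubseq.1) (pvDiffWitness_maxSubseq.2) ∧ D_maxSubseq (pvDiffWitness_maxSubseq.1) (pvDiffWitness_maxSubseq.2) ∧ maxSubseq (pvDiffWitness_maxSubseq.1) (pvDiffWitness_maxSubseq.2) = pvDiffWitnessOut_maxSubseq.1 ∧ maxSubseq_alt (pvDiffWitness_maxSubseq.1) (pvDiffWitness_maxSubseq.2) = pvDiffWitnessOut_maxSubseq.2 ∧ pvDiffWitnessOut_maxSubseq.1 ≠ pvDiffWitnessOut_maxSubseq.2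
def Claim_exact_maxSubseq : Prop := ∀ (s : String) (k : Int), Dom_maxSubseq s k → Pre_maxSubseq s k → D_maxSubseq s k → maxSubseq s k ≠ maxSubseq_alt s k

-- ===== LEMMAS AND PROOFS =====

-- one removal step of B
def stepB (t : List Char) : List Char :=
  t.take (ascentIdx t 0) ++ t.drop (ascentIdx t 0 + 1)

-- "non-increasing" (adjacent-wise)
def NI (l : List Char) : Prop := List.IsChain (fun a b => b ≤ a) l

-- the budget-free pop loop (what popLoopA does when the budget cannot run out)
def popU (res : List Char) (c : Char) : List Char :=
  match h : res.getLast? with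
  | some x => if x < c then popU res.dropLast c else res
  | none => res
termination_by res.length
decreasing_by
  cases res with
  | nil => simp at h
  | cons y ys => simp [List.length_dropLast]

-- the budget-free run of A's loop
def hullRun : List Char → List Char → List Char
  | [], res => res
  | c :: cs, res => hullRun cs (popU res c ++ [c])

theorem popLoopA_of_not (res : List Char) (t : Int) (c : Char)
    (h : ∀ x ∈ res.getLast?, ¬ x < c) : popLoopA res t c = (res, t) := by
  unfold popLoopA
  cases hg : res.getLast? with
  | none => simp
  | some x =>
      have := h x (by simp [hg])
      simp [this]

theorem popLoopA_zero (res : List Char) (c : Char) : popLoopA res 0 c = (res, 0) := by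
  unfold popLoopA
  cases hg : res.getLast? <;> simp

theorem runA_zero : ∀ (l res : List Char), maxSubseqLoop l res 0 = (res ++ l, 0) := by
  intro l
  induction l with
  | nil => intro res; simp [maxSubseqLoop]
  | cons c cs ih =>
      intro res
      simp [maxSubseqLoop, popLoopA_zero, ih]

theorem runA_noPop : ∀ (l res : List Char) (t : Int),
    NI (res ++ l) → maxSubseqLoop l res t = (res ++ l, t) := by
  intro l
  induction l with
  | nil => intro res t _; simp [maxSubseqLoop]
  | cons c cs ih =>
      intro res t hni
      have hlast : ∀ x ∈ res.getLast?, ¬ x < c := by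
        intro x hx
        rcases List.isChain_append.mp hni with ⟨_, _, hcross⟩
        have := hcross x hx c (by simp)
        exact not_lt.mpr this
      simp only [maxSubseqLoop, popLoopA_of_not res t c hlast]
      have : NI ((res ++ [c]) ++ cs) := by simpa using hni
      simpa using ih (res ++ [c]) t this

theorem runA_append : ∀ (xs ys res : List Char) (t : Int),
    maxSubseqLoop (xs ++ ys) res t =
      maxSubseqLoop ys (maxSubseqLoop xs res t).1 (maxSubseqLoop xs res t).2 := by
  intro xs
  induction xs with
  | nil => intro ys res t; simp [maxSubseqLoop]
  | cons c cs ih =>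
      intro ys res t
      simp [maxSubseqLoop, ih]

theorem ascentIdx_lt (t : List Char) : ∀ (i : Nat), i < t.length → ascentIdx t i < t.length := by
  intro i
  induction i using ascentIdx.induct t with
  | case1 i h hge ih =>
      intro _
      rw [ascentIdx]
      simp only [h, dif_pos, hge, if_pos]
      exact ih h
  | case2 i h hge =>
      intro hi
      rw [ascentIdx]
      simp only [h, dif_pos, hge, if_neg]
      exact hi
  | case3 i h =>
      intro hi
      rw [ascentIdx, dif_neg h]
      exact hi

theorem ascentIdx_NI (t : List Char) (hni : NI t) :
    ∀ i, i < t.length → ascentIdx t i = t.length - 1 := by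
  intro i
  induction i using ascentIdx.induct t with
  | case1 i h hge ih =>
      intro _
      rw [ascentIdx]
      simp only [h, dif_pos, hge, if_pos]
      exact ih h
  | case2 i h hge =>
      intro _
      exfalso
      have := (List.isChain_iff_getElem.mp hni) i h
      exact hge this
  | case3 i h =>
      intro hi
      rw [ascentIdx, dif_neg h]
      omega

theorem ascentIdx_split (p : List Char) (a b : Char) (rest : List Char)
    (hni : NI (p ++ [a])) (hab : a < b) :
    ∀ i, i ≤ p.length → ascentIdx (p ++ a :: b :: rest) i = p.length := by
  intro i
  have hlen : (p ++ a :: b :: rest).length = p.length + 2 + rest.length := by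
    simp; omega
  induction hm : p.length - i generalizing i with
  | zero =>
      intro hi
      have hieq : i = p.length := by omega
      subst hieq
      rw [ascentIdx]
      have h1 : p.length + 1 < (p ++ a :: b :: rest).length := by omega
      have hga : (p ++ a :: b :: rest)[p.length]'(by omega) = a := by
        rw [List.getElem_append_right (by omega)]
        simp
      have hgb : (p ++ a :: b :: rest)[p.length + 1]'h1 = b := by
        rw [List.getElem_append_right (by omega)]
        simp
      simp only [h1, dif_pos, hga, hgb]
      rw [if_neg (not_le.mpr hab)]
  | succ m ih =>
      intro hi
      have hilt : i < p.length := by omega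
      rw [ascentIdx]
      have h1 : i + 1 < (p ++ a :: b :: rest).length := by omega
      have hchain := List.isChain_iff_getElem.mp hni
      have hlen2 : (p ++ [a]).length = p.length + 1 := by simp
      have hstep : (p ++ a :: b :: rest)[i]'(Nat.lt_of_succ_lt h1) ≥
          (p ++ a :: b :: rest)[i + 1]'h1 := by
        have hc := hchain i (by omega)
        have e1 : (p ++ [a])[i]'(by omega) = (p ++ a :: b :: rest)[i]'(Nat.lt_of_succ_lt h1) := by
          by_cases hip : i < p.length
          · rw [List.getElem_append_left hip, List.getElem_append_left hip]
          · omega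
        have e2 : (p ++ [a])[i + 1]'(by omega) = (p ++ a :: b :: rest)[i + 1]'h1 := by
          by_cases hip : i + 1 < p.length
          · rw [List.getElem_append_left hip, List.getElem_append_left hip]
          · have h3 : i + 1 - p.length = 0 := by omega
            rw [List.getElem_append_right (by omega), List.getElem_append_right (by omega)]
            simp [h3]
        rw [← e1, ← e2]
        exact hc
      simp only [h1, dif_pos, hstep, if_pos]
      exact ih (i + 1) (by omega) (by omega)

theorem decomp (l : List Char) :
    NI l ∨ ∃ p a b rest, l = p ++ a :: b :: rest ∧ NI (p ++ [a]) ∧ a < b := by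
  induction l with
  | nil => left; exact List.isChain_nil
  | cons x tl ih =>
      cases tl with
      | nil => left; simp [NI]
      | cons y tl' =>
          by_cases hxy : x < y
          · right
            exact ⟨[], x, y, tl', by simp, by simp [NI], hxy⟩
          · have hyx : y ≤ x := not_lt.mp hxy
            rcases ih with hni | ⟨p, a, b, rest, heq, hpa, hab⟩
            · left
              exact List.isChain_cons.mpr ⟨by intro z hz; simp at hz; subst hz; exact hyx, hni⟩
            · right
              refine ⟨x :: p, a, b, rest, by simp [heq], ?_, hab⟩
              have hhead : (p ++ [a]).head? = some y := by
                have h1 : (p ++ a :: b :: rest).head? = some y := by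
                  rw [← heq]; rfl
                rw [List.head?_append] at h1 ⊢
                cases hp : p.head? with
                | some z => simp [hp] at h1 ⊢; exact h1
                | none => simp [hp] at h1 ⊢; simp_all
              rw [List.cons_append]
              exact List.isChain_cons.mpr
                ⟨by intro z hz; rw [hhead] at hz; simp at hz; subst hz; exact hyx, hpa⟩

theorem popLoopA_concat (l : List Char) (x : Char) (t : Int) (c : Char)
    (ht : t ≠ 0) (hxc : x < c) : popLoopA (l ++ [x]) t c = popLoopA l (t - 1) c := by
  rw [popLoopA]
  split
  · rename_i x' hx'
    rw [List.getLast?_concat] at hx'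
    injection hx' with hx'
    subst hx'
    rw [if_pos ⟨ht, hxc⟩, List.dropLast_concat]
  · rename_i hx'
    rw [List.getLast?_concat] at hx'
    cases hx'

theorem stepState (p : List Char) (a b : Char) (rest : List Char) (t : Int)
    (hni : NI (p ++ [a])) (hab : a < b) (ht : t ≠ 0) :
    maxSubseqLoop (p ++ a :: b :: rest) [] t = maxSubseqLoop (p ++ b :: rest) [] (t - 1) := by
  have hnp : NI p := by
    rcases List.isChain_append.mp hni with ⟨h1, _, _⟩
    exact h1
  have hrunp : maxSubseqLoop p [] t = (p, t) := by
    simpa using runA_noPop p [] t (by simpa using hnp)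
  have hrunp' : maxSubseqLoop p [] (t - 1) = (p, t - 1) := by
    simpa using runA_noPop p [] (t - 1) (by simpa using hnp)
  rw [runA_append, hrunp, runA_append, hrunp']
  have hpopa : popLoopA p t a = (p, t) := by
    apply popLoopA_of_not
    intro x hx
    rcases List.isChain_append.mp hni with ⟨_, _, hcross⟩
    exact not_lt.mpr (hcross x hx a (by simp))
  have hpopb : popLoopA (p ++ [a]) t b = popLoopA p (t - 1) b :=
    popLoopA_concat p a t b ht hab
  simp only [maxSubseqLoop, hpopa, hpopb]

theorem stepB_NI (l : List Char) (hl : l ≠ []) (hni : NI l) : stepB l = l.dropLast := by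
  unfold stepB
  have hlen : 0 < l.length := List.length_pos_iff.mpr hl
  rw [ascentIdx_NI l hni 0 hlen]
  have : l.length - 1 + 1 = l.length := by omega
  rw [this, List.drop_length, List.append_nil, ← List.dropLast_eq_take]

theorem stepB_split (p : List Char) (a b : Char) (rest : List Char)
    (hni : NI (p ++ [a])) (hab : a < b) :
    stepB (p ++ a :: b :: rest) = p ++ b :: rest := by
  unfold stepB
  rw [ascentIdx_split p a b rest hni hab 0 (Nat.zero_le _)]
  rw [List.take_left, List.drop_append]
  simp

theorem main_ind : ∀ (k : Nat) (l : List Char), k ≤ l.length →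
    (maxSubseqLoop l [] (k : Int)).1.take (l.length - k) = stepB^[k] l := by
  intro k
  induction k with
  | zero =>
      intro l _
      simp [runA_zero]
  | succ k ih =>
      intro l hk
      have hl : l ≠ [] := by
        intro h; subst h; simp at hk
      rcases decomp l with hni | ⟨p, a, b, rest, heq, hpa, hab⟩
      · have hrun : maxSubseqLoop l [] (((k + 1 : Nat) : Int)) = (l, ((k + 1 : Nat) : Int)) := by
          simpa using runA_noPop l [] _ (by simpa using hni)
        rw [hrun]
        have hdl : NI l.dropLast := List.IsChain.dropLast hni
        have hlen : l.dropLast.length = l.length - 1 := by simp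
        have hrun2 : maxSubseqLoop l.dropLast [] (((k : Nat) : Int)) = (l.dropLast, ((k : Nat) : Int)) := by
          simpa using runA_noPop l.dropLast [] _ (by simpa using hdl)
        have ihd := ih l.dropLast (by omega)
        rw [hrun2] at ihd
        rw [Function.iterate_succ_apply, stepB_NI l hl hni, ← ihd, hlen]
        rw [List.dropLast_eq_take, List.take_take]
        congr 1
        omega
      · subst heq
        have hlen : (p ++ a :: b :: rest).length = p.length + 2 + rest.length := by simp; omega
        have ht : (((k + 1 : Nat) : Int)) ≠ 0 := by positivity
        have hstep := stepState p a b rest (((k + 1 : Nat) : Int)) hpa hab ht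
        have hcast : (((k + 1 : Nat) : Int)) - 1 = ((k : Nat) : Int) := by push_cast; ring
        rw [hcast] at hstep
        rw [hstep]
        have hlen2 : (p ++ b :: rest).length = p.length + 1 + rest.length := by simp; omega
        have ihd := ih (p ++ b :: rest) (by omega)
        rw [Function.iterate_succ_apply, stepB_split p a b rest hpa hab]
        rw [← ihd]
        congr 1
        omega

-- ===== the budget-free (k > n) regime =====

theorem popU_some_lt (res : List Char) (c x : Char) (h : res.getLast? = some x) (hlt : x < c) :
    popU res c = popU res.dropLast c := by
  rw [popU]
  split
  · rename_i x' hx'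
    rw [h] at hx'; injection hx' with hx'; subst hx'
    rw [if_pos hlt]
  · rename_i hx'
    rw [h] at hx'; cases hx'

theorem popU_some_ge (res : List Char) (c x : Char) (h : res.getLast? = some x) (hge : ¬ x < c) :
    popU res c = res := by
  rw [popU]
  split
  · rename_i x' hx'
    rw [h] at hx'; injection hx' with hx'; subst hx'
    rw [if_neg hge]
  · rfl

theorem popU_none (res : List Char) (c : Char) (h : res.getLast? = none) : popU res c = res := by
  rw [popU]
  split
  · rename_i x' hx'
    rw [h] at hx'; cases hx'
  · rfl

theorem popU_length_le : ∀ (res : List Char) (c : Char), (popU res c).length ≤ res.length := by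
  intro res c
  induction res using popU.induct (c := c) with
  | case1 res x h hlt ih =>
      rw [popU_some_lt res c x h hlt]
      have : res.dropLast.length = res.length - 1 := by simp
      omega
  | case2 res x h hlt =>
      rw [popU_some_ge res c x h hlt]
  | case3 res h =>
      rw [popU_none res c h]

theorem popLoopA_large : ∀ (res : List Char) (c : Char) (t : Int), (res.length : Int) < t →
    popLoopA res t c = (popU res c, t - res.length + (popU res c).length) := by
  intro res c
  induction res using popU.induct (c := c) with
  | case1 res x h hlt ih =>
      intro t htt
      have hres : res ≠ [] := by
        intro hr; subst hr; simp at h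
      have hdll : res.dropLast.length = res.length - 1 := by simp
      have hlenpos : 0 < res.length := List.length_pos_iff.mpr hres
      rw [popLoopA]
      split
      · rename_i x' hx'
        rw [h] at hx'
        injection hx' with hx'
        subst hx'
        rw [if_pos ⟨by omega, hlt⟩]
        rw [ih (t - 1) (by omega)]
        rw [popU_some_lt res c x h hlt]
        rw [Prod.mk.injEq]
        refine ⟨rfl, ?_⟩
        have := popU_length_le res.dropLast c
        omega
      · rename_i hx'
        rw [h] at hx'
        cases hx'
  | case2 res x h hlt =>
      intro t htt
      rw [popU_some_ge res c x h hlt]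
      rw [popLoopA_of_not]
      · rw [Prod.mk.injEq]
        exact ⟨rfl, by omega⟩
      · intro y hy
        rw [h] at hy
        simp at hy
        subst hy
        exact hlt
  | case3 res h =>
      intro t htt
      rw [popU_none res c h]
      rw [popLoopA_of_not]
      · rw [Prod.mk.injEq]
        exact ⟨rfl, by omega⟩
      · intro y hy
        rw [h] at hy
        cases hy

theorem runA_large : ∀ (l res : List Char) (t : Int), ((l.length + res.length : Nat) : Int) ≤ t →
    maxSubseqLoop l res t =
      (hullRun l res, t - res.length - l.length + (hullRun l res).length) := by
  intro l
  induction l with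
  | nil =>
      intro res t ht
      simp [maxSubseqLoop, hullRun]
  | cons c cs ih =>
      intro res t ht
      have h1 : (res.length : Int) < t := by
        simp at ht
        push_cast at ht ⊢
        omega
      have hu := popU_length_le res c
      simp only [maxSubseqLoop, popLoopA_large res c t h1]
      rw [ih (popU res c ++ [c]) _ (by simp at ht ⊢; push_cast at ht ⊢; omega)]
      simp only [hullRun]
      rw [Prod.mk.injEq]
      refine ⟨rfl, ?_⟩
      simp only [List.length_append, List.length_cons, List.length_nil]
      push_cast
      omega

theorem NI_last_le : ∀ (res : List Char), NI res → ∀ x ∈ res.getLast?, ∀ y ∈ res, x ≤ y := by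
  intro res
  induction res with
  | nil => intro _ x hx; cases hx
  | cons a res ih =>
      intro hni x hx y hy
      cases res with
      | nil =>
          simp at hx hy
          subst hx; subst hy; exact le_refl _
      | cons b rest =>
          rcases List.isChain_cons_cons.mp hni with ⟨hba, hni'⟩
          have hx' : x ∈ (b :: rest).getLast? := by
            simpa using hx
          rcases List.mem_cons.mp hy with hya | hyr
          · subst hya
            have hxb : x ≤ b := ih hni' x hx' b (by simp)
            exact le_trans hxb hba
          · exact ih hni' x hx' y hyr

theorem NI_popU : ∀ (res : List Char) (c : Char), NI res → NI (popU res c) := by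
  intro res c
  induction res using popU.induct (c := c) with
  | case1 res x h hlt ih =>
      intro hni
      rw [popU_some_lt res c x h hlt]
      exact ih (List.IsChain.dropLast hni)
  | case2 res x h hlt =>
      intro hni
      rw [popU_some_ge res c x h hlt]
      exact hni
  | case3 res h =>
      intro hni
      rw [popU_none res c h]
      exact hni

theorem popU_last_ge : ∀ (res : List Char) (c : Char), ∀ x ∈ (popU res c).getLast?, ¬ x < c := by
  intro res c
  induction res using popU.induct (c := c) with
  | case1 res x h hlt ih =>
      rw [popU_some_lt res c x h hlt]
      exact ih
  | case2 res x h hlt =>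
      rw [popU_some_ge res c x h hlt]
      intro y hy
      rw [h] at hy
      simp at hy
      subst hy
      exact hlt
  | case3 res h =>
      rw [popU_none res c h]
      intro y hy
      rw [h] at hy
      cases hy

theorem popU_filter : ∀ (res : List Char) (c : Char), NI res →
    popU res c = res.filter (fun x => !decide (x < c)) := by
  intro res c
  induction res using popU.induct (c := c) with
  | case1 res x h hlt ih =>
      intro hni
      have hres : res ≠ [] := by intro hr; subst hr; simp at h
      have hx : res.getLast hres = x := by
        have h2 : res.getLast? = some (res.getLast hres) := List.getLast?_eq_some_getLast hres
        rw [h] at h2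
        injection h2 with h2
        exact h2.symm
      have hsplit : res.dropLast ++ [x] = res := by
        rw [← hx]
        exact List.dropLast_append_getLast hres
      rw [popU_some_lt res c x h hlt]
      rw [ih (List.IsChain.dropLast hni)]
      conv_rhs => rw [← hsplit]
      rw [List.filter_append]
      simp [hlt]
  | case2 res x h hlt =>
      intro hni
      rw [popU_some_ge res c x h hlt]
      symm
      apply List.filter_eq_self.mpr
      intro y hy
      have hxy : x ≤ y := NI_last_le res hni x (by rw [h]; simp) y hy
      simp only [Bool.not_eq_eq_eq_not, Bool.not_true, decide_eq_false_iff_not]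
      intro hyc
      exact hlt (lt_of_le_of_lt hxy hyc)
  | case3 res h =>
      intro _
      have : res = [] := by
        cases res with
        | nil => rfl
        | cons a l => simp at h
      subst this
      rw [popU_none [] c rfl]
      simp

theorem hullRun_append : ∀ (xs ys res : List Char),
    hullRun (xs ++ ys) res = hullRun ys (hullRun xs res) := by
  intro xs
  induction xs with
  | nil => intro ys res; simp [hullRun]
  | cons c cs ih =>
      intro ys res
      simp [hullRun, ih]

theorem NI_hullRun : ∀ (l res : List Char), NI res → NI (hullRun l res) := by
  intro l
  induction l with
  | nil => intro res h; exact h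
  | cons c cs ih =>
      intro res hni
      simp only [hullRun]
      apply ih
      apply List.isChain_append.mpr
      refine ⟨NI_popU res c hni, by simp [NI], ?_⟩
      intro x hx y hy
      simp at hy
      subst hy
      exact not_lt.mp (popU_last_ge res c x hx)

theorem smP_append (l : List Char) (c : Char) (i : Nat) (hi : i < l.length) :
    smP (l ++ [c]) i = (smP l i && !decide (l[i]! < c)) := by
  have hgi : (l ++ [c])[i]! = l[i]! := by
    rw [getElem!_pos (l ++ [c]) i (by simp; omega), getElem!_pos l i hi,
      List.getElem_append_left hi]
  have hgc : (l ++ [c])[l.length]! = c := by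
    rw [getElem!_pos (l ++ [c]) l.length (by simp),
      List.getElem_append_right (le_refl _)]
    simp
  simp only [smP, hgi]
  by_cases hc : l[i]! < c
  · simp only [hc, decide_true, Bool.not_true, Bool.and_false]
    apply decide_eq_false
    intro hall
    have hthis := hall l.length (by simp) hi
    rw [hgc] at hthis
    exact absurd hc (not_lt.mpr hthis)
  · simp only [hc, decide_false, Bool.not_false, Bool.and_true]
    apply decide_eq_decide.mpr
    constructor
    · intro hall j hj hij
      have hthis := hall j (by simp; omega) hij
      rwa [getElem!_pos (l ++ [c]) j (by simp; omega), List.getElem_append_left hj,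
        ← getElem!_pos l j hj] at hthis
    · intro hall j hj hij
      simp at hj
      by_cases hjl : j < l.length
      · have hthis := hall j hjl hij
        rw [getElem!_pos (l ++ [c]) j (by simp; omega), List.getElem_append_left hjl,
          ← getElem!_pos l j hjl]
        exact hthis
      · have hje : j = l.length := by omega
        subst hje
        rw [hgc]
        exact not_lt.mp hc

theorem smP_last (l : List Char) (c : Char) : smP (l ++ [c]) l.length = true := by
  simp only [smP]
  apply decide_eq_true
  intro j hj hij
  simp at hj
  omega

theorem hull_eq : ∀ (l : List Char),
    hullRun l [] = ((List.range l.length).filter (smP l)).map (fun i => l[i]!) := by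
  intro l
  induction l using List.reverseRecOn with
  | nil => simp [hullRun]
  | append_singleton l c ih =>
      rw [hullRun_append]
      simp only [hullRun]
      rw [popU_filter (hullRun l []) c (NI_hullRun l [] (by simp [NI])), ih]
      rw [List.filter_map, List.filter_filter]
      have h0 : List.filter (fun a => ((fun x => !decide (x < c)) ∘ fun i => l[i]!) a && smP l a)
          (List.range l.length) =
          List.filter (fun i => smP l i && !decide (l[i]! < c)) (List.range l.length) :=
        List.filter_congr (by intro i _; simp [Bool.and_comm])
      rw [h0]
      have hr : List.range (l ++ [c]).length = List.range l.length ++ [l.length] := by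
        simp [List.range_succ]
      rw [hr, List.filter_append]
      have h2 : List.filter (smP (l ++ [c])) [l.length] = [l.length] := by
        simp [smP_last]
      rw [h2]
      have h3 : List.filter (smP (l ++ [c])) (List.range l.length) =
          List.filter (fun i => smP l i && !decide (l[i]! < c)) (List.range l.length) := by
        apply List.filter_congr
        intro i hi
        simp at hi
        exact smP_append l c i hi
      rw [h3, List.map_append]
      congr 1
      · apply List.map_congr_left
        intro i hi
        simp at hi
        rw [getElem!_pos l i hi.1, getElem!_pos (l ++ [c]) i (by simp; omega),
          List.getElem_append_left hi.1]
      · simp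

theorem hullCnt_eq (l : List Char) : hullCnt l = (hullRun l []).length := by
  rw [hull_eq, List.length_map, hullCnt, List.countP_eq_length_filter]

-- ===== B-side lemmas =====

theorem length_stepB (t : List Char) (ht : t ≠ []) : (stepB t).length = t.length - 1 := by
  have hi := ascentIdx_lt t 0 (List.length_pos_iff.mpr ht)
  simp only [stepB, List.length_append, List.length_take, List.length_drop]
  omega

theorem delLoop_eq_iter : ∀ (m : Nat) (t : List Char), m ≤ t.length →
    delLoop m t = stepB^[m] t := by
  intro m
  induction m with
  | zero => intro t _; rfl
  | succ m ih =>
      intro t hm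
      have ht : t ≠ [] := by
        intro h; subst h; simp at hm
      rw [delLoop, if_neg ht, Function.iterate_succ_apply]
      have : t.take (ascentIdx t 0) ++ t.drop (ascentIdx t 0 + 1) = stepB t := rfl
      rw [this]
      exact ih (stepB t) (by rw [length_stepB t ht]; omega)

theorem delLoop_empty : ∀ (m : Nat) (t : List Char), t.length ≤ m → delLoop m t = [] := by
  intro m
  induction m with
  | zero =>
      intro t ht
      have : t = [] := List.length_eq_zero_iff.mp (by omega)
      subst this; rfl
  | succ m ih =>
      intro t ht
      by_cases h : t = []
      · subst h; rw [delLoop, if_pos rfl]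
      · rw [delLoop, if_neg h]
        exact ih _ (by rw [show t.take (ascentIdx t 0) ++ t.drop (ascentIdx t 0 + 1) = stepB t from rfl, length_stepB t h]; omega)

theorem evalA_witness : maxSubseq "ba" 3 = "b" := by
  have htl : "ba".toList = ['b', 'a'] := by decide
  have hni : NI ['b', 'a'] := by
    unfold NI
    decide
  unfold maxSubseq
  rw [htl, runA_noPop ['b', 'a'] [] 3 (by simpa using hni)]
  have hm : (("ba".length : Nat) : Int) - 3 = -1 := by decide
  rw [hm, PySem.List.slice_to_neg_one]
  decide

theorem evalB_witness : maxSubseq_alt "ba" 3 = "" := by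
  unfold maxSubseq_alt
  have htl : "ba".toList = ['b', 'a'] := by decide
  rw [htl, delLoop_empty (Int.toNat 3) ['b', 'a'] (by decide)]

-- ===== VERDICT (by name: the statement is the Claim_ definition above) =====
theorem maxSubseq_spec : Claim_unchanged_maxSubseq := by
  intro s k _ hpre hnd
  unfold Pre_maxSubseq at hpre
  unfold maxSubseq maxSubseq_alt
  have htl : s.toList.length = s.length := String.length_toList
  by_cases hkn : k ≤ (s.length : Int)
  · -- 0 ≤ k ≤ n : the two greedy computations agree
    rw [delLoop_eq_iter k.toNat s.toList (by omega)]
    have hlen : (s.length : Int) - k = ((s.toList.length - k.toNat : Nat) : Int) := by omega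
    have hk : k = ((k.toNat : Nat) : Int) := by omega
    rw [hlen, PySem.List.slice_to_natCast]
    congr 1
    rw [hk]
    exact main_ind k.toNat s.toList (by omega)
  · -- n < k and ¬D_ : the budget never runs out, and the negative slice empties the stack
    unfold D_maxSubseq at hnd
    push_neg at hnd
    have hcnt := hnd (by omega)
    rw [delLoop_empty k.toNat s.toList (by omega)]
    rw [runA_large s.toList [] k (by simp; omega)]
    have hm : (s.length : Int) - k = -(((k - (s.length : Int)).toNat : Nat) : Int) := by omega
    rw [hm, PySem.List.slice_to_neg_natCast _ _ (by omega)]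
    have hh := hullCnt_eq s.toList
    have : (hullRun s.toList []).length - (k - (s.length : Int)).toNat = 0 := by omega
    simp only []
    rw [this, List.take_zero]

theorem maxSubseq_changed : Claim_changed_maxSubseq := by
  unfold Claim_changed_maxSubseq
  refine ⟨by decide, by decide, by decide, evalA_witness, evalB_witness, by decide⟩

theorem maxSubseq_tight : Claim_exact_maxSubseq := by
  intro s k _ hpre hd
  unfold D_maxSubseq at hd
  unfold Pre_maxSubseq at hpre
  unfold maxSubseq maxSubseq_alt
  have htl : s.toList.length = s.length := String.length_toList
  intro heq
  have hlen := congrArg String.length heq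
  rw [delLoop_empty k.toNat s.toList (by omega)] at hlen
  rw [runA_large s.toList [] k (by simp; omega)] at hlen
  have hm : (s.length : Int) - k = -(((k - (s.length : Int)).toNat : Nat) : Int) := by omega
  rw [hm, PySem.List.slice_to_neg_natCast _ _ (by omega)] at hlen
  have hh := hullCnt_eq s.toList
  simp only [String.length_ofList, List.length_take, List.length_nil] at hlen
  omega
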